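-- pv_equiv track=rewrite | github.com/techtor87/Advent_of_Code | Advent_2023/day_11/day_11.py | calculate_coordinates
-- ===== SOURCE A (Python) =====
-- def calculate_coordinates(input, empty_multiplier):
--     coordinates = []
--     row_value = -1
--     for row in range(len(input)):
--         if '#' not in input[row]:
--             row_value += empty_multiplier
--         else:
--             row_value += 1
--
--         for column in range(len(input[row])):
--             if input[row][column] == '#':
--                 coordinates.append((column+(input[row][:column].count('*') * (empty_multiplier-1)), row_value))
--     return coordinates
-- ===== SOURCE B (Python) =====
-- def calculate_coordinates(input, empty_multiplier):
--     # One pass per row: a running count of '*' replaces re-slicing and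
--     # recounting the prefix for every galaxy column.
--     coordinates = []
--     row_value = -1
--     for row_str in input:
--         row_value += 1 if '#' in row_str else empty_multiplier
--         stars = 0
--         for column, ch in enumerate(row_str):
--             if ch == '#':
--                 coordinates.append((column + stars * (empty_multiplier - 1), row_value))
--             elif ch == '*':
--                 stars += 1
--     return coordinates
-- ===== Notes on version B (the rewrite author's own statement) =====
-- stated objective: alternative
-- what changed: B makes one pass over each row with a running '*' counter (iterating rows and characters directly), instead of A's indexing by range and re-slicing the row prefix to recount '*' for every galaxy column.
import Mathlib
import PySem

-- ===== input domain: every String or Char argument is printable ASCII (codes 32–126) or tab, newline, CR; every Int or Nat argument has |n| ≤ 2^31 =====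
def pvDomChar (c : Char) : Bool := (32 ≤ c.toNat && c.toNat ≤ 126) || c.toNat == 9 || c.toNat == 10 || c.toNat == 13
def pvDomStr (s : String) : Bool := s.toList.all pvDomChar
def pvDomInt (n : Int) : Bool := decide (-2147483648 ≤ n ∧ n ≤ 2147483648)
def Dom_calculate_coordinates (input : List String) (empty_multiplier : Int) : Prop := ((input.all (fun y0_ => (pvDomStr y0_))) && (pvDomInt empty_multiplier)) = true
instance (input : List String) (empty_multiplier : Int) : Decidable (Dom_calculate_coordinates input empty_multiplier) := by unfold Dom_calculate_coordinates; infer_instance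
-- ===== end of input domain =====

-- B replaces A's per-column prefix slice-and-count by a single running '*' counter per row
-- (objective: alternative, one pass per row instead of re-slicing); return values are proved identical.

-- ===== PORT A =====
-- one iteration of A's outer loop body (row_value update, then the inner column loop)
def pvRowA (m : Int) (st : List (Int × Int) × Int) (s : String) : List (Int × Int) × Int :=
  let rv := if !(PySem.Str.isIn "#" s) then st.2 + m else st.2 + 1
  ((PySem.List.pyRange 0 (PySem.Str.len s) 1).foldl
      (fun acc column =>
        if PySem.Str.pyGet? s column == some '#' then
          acc ++ [(column + ((PySem.Str.count (PySem.Str.slice s none (some column)) "*" : Int)) * (m - 1), rv)]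
        else acc)
      st.1,
   rv)

def calculate_coordinates (input : List String) (empty_multiplier : Int) : List (Int × Int) :=
  ((PySem.List.pyRange 0 (input.length : Int) 1).foldl
      (fun st row => pvRowA empty_multiplier st (PySem.List.pyGetD input row ""))
      ([], -1)).1

-- ===== PORT B =====
-- one iteration of B's outer loop body: running star counter, chars visited once via enumerate
def pvRowB (m : Int) (st : List (Int × Int) × Int) (s : String) : List (Int × Int) × Int :=
  let rv := st.2 + (if PySem.Str.isIn "#" s then 1 else m)
  let p := (PySem.List.enumerate s.toList 0).foldl
      (fun (p : List (Int × Int) × Int) ic =>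
        if ic.2 == '#' then (p.1 ++ [(ic.1 + p.2 * (m - 1), rv)], p.2)
        else if ic.2 == '*' then (p.1, p.2 + 1)
        else p)
      (st.1, 0)
  (p.1, rv)

def calculate_coordinates_alt (input : List String) (empty_multiplier : Int) : List (Int × Int) :=
  (input.foldl (pvRowB empty_multiplier) ([], -1)).1

-- ===== PRECONDITION & SPEC =====
def Spec_calculate_coordinates (input : List String) (empty_multiplier : Int) (out : List (Int × Int)) : Prop := out = calculate_coordinates_alt input empty_multiplier
instance (input : List String) (empty_multiplier : Int) (out : List (Int × Int)) : Decidable (Spec_calculate_coordinates input empty_multiplier out) := by unfold Spec_calculate_coordinates; infer_instance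

-- ===== CLAIM (what is proved, stated in full; the proofs are below) =====
def Claim_equal_calculate_coordinates : Prop := ∀ (input : List String) (empty_multiplier : Int), Dom_calculate_coordinates input empty_multiplier → Spec_calculate_coordinates input empty_multiplier (calculate_coordinates input empty_multiplier)

-- ===== LEMMAS AND PROOFS =====

-- Python str.count with a single-character needle is List.count
theorem pv_count_go_singleton (c : Char) :
    ∀ (s : List Char) (fuel acc : Nat), s.length ≤ fuel →
      PySem.Chars.count.go [c] fuel s acc = acc + s.count c := by
  intro s
  induction s with
  | nil =>
    intro fuel acc _
    cases fuel <;> simp [PySem.Chars.count.go]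
  | cons h t ih =>
    intro fuel acc hle
    cases fuel with
    | zero => simp at hle
    | succ n =>
      simp only [PySem.Chars.count.go]
      by_cases hc : c = h
      · subst hc
        simp only [List.isPrefixOf, BEq.rfl, Bool.and_self, if_true,
          List.length_cons, List.length_nil, List.drop_succ_cons, List.drop_zero]
        rw [ih n (acc + 1) (by simpa using hle)]
        simp
        omega
      · have hpre : ([c].isPrefixOf (h :: t)) = false := by
          simp [List.isPrefixOf]
          exact fun hh => hc hh
        rw [hpre]
        simp only [Bool.false_eq_true, if_false]
        rw [ih n acc (by simpa using hle)]
        rw [List.count_cons_of_ne (Ne.symm hc)]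

theorem pv_chars_count_singleton (s : List Char) (c : Char) :
    PySem.Chars.count s [c] = s.count c := by
  unfold PySem.Chars.count
  simp only [List.isEmpty_cons, if_false, Bool.false_eq_true]
  simpa using pv_count_go_singleton c s s.length 0 le_rfl

-- A's inner column loop, after normalising indices to List.range over s.toList
def pvInnerA (cs : List Char) (m rv : Int) (acc : List (Int × Int)) : List (Int × Int) :=
  (List.range cs.length).foldl
    (fun a (k : Nat) =>
      if cs[k]? == some '#' then
        a ++ [(((k : Nat) : Int) + ((cs.take k).count '*' : Int) * (m - 1), rv)]
      else a)
    acc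

-- B's inner loop computes A's inner result, and its star counter is the row's '*'-count
theorem pv_inner_pair (m rv : Int) (cs : List Char) :
    ∀ acc : List (Int × Int),
      (PySem.List.enumerate cs 0).foldl
        (fun (p : List (Int × Int) × Int) ic =>
          if ic.2 == '#' then (p.1 ++ [(ic.1 + p.2 * (m - 1), rv)], p.2)
          else if ic.2 == '*' then (p.1, p.2 + 1)
          else p)
        (acc, 0)
      = (pvInnerA cs m rv acc, (cs.count '*' : Int)) := by
  induction cs using List.reverseRecOn with
  | nil => intro acc; simp [PySem.List.enumerate_nil, pvInnerA]
  | append_singleton cs c ih =>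
    intro acc
    rw [PySem.List.enumerate_append, List.foldl_append, ih acc]
    have hA : pvInnerA (cs ++ [c]) m rv acc
        = (if c = '#' then
            pvInnerA cs m rv acc ++ [((cs.length : Int) + ((cs.count '*' : Nat) : Int) * (m - 1), rv)]
          else pvInnerA cs m rv acc) := by
      unfold pvInnerA
      rw [show (cs ++ [c]).length = cs.length + 1 by simp, List.range_succ, List.foldl_append]
      have hcong :
          (List.range cs.length).foldl
            (fun a (k : Nat) =>
              if (cs ++ [c])[k]? == some '#' then
                a ++ [(((k : Nat) : Int) + (((cs ++ [c]).take k).count '*' : Int) * (m - 1), rv)]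
              else a) acc
          = (List.range cs.length).foldl
            (fun a (k : Nat) =>
              if cs[k]? == some '#' then
                a ++ [(((k : Nat) : Int) + ((cs.take k).count '*' : Int) * (m - 1), rv)]
              else a) acc := by
        apply PySem.List.foldl_congr_mem
        intro a k hk
        rw [List.mem_range] at hk
        rw [List.getElem?_append_left hk, List.take_append_of_le_length (le_of_lt hk)]
      rw [hcong]
      simp only [List.foldl_cons, List.foldl_nil, List.getElem?_concat_length, List.take_left]
      by_cases hc : c = '#'
      · simp [hc]
      · simp [hc, beq_iff_eq]
    rw [hA]
    simp only [PySem.List.enumerate_cons, PySem.List.enumerate_nil, List.foldl_cons, List.foldl_nil]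
    by_cases hc : c = '#'
    · subst hc
      simp [List.count_append]
    · by_cases hs : c = '*'
      · subst hs
        simp [hc, List.count_append]
      · simp [hc, hs, List.count_append]

-- each outer-loop iteration of A equals the corresponding iteration of B
theorem pv_row_eq (m : Int) (st : List (Int × Int) × Int) (s : String) :
    pvRowA m st s = pvRowB m st s := by
  simp only [pvRowA, pvRowB]
  have hrv : (if !(PySem.Str.isIn "#" s) then st.2 + m else st.2 + 1)
      = st.2 + (if PySem.Str.isIn "#" s then 1 else m) := by
    cases PySem.Str.isIn "#" s <;> simp
  rw [hrv]
  rw [pv_inner_pair m (st.2 + (if PySem.Str.isIn "#" s then 1 else m)) s.toList st.1]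
  simp only
  congr 1
  rw [PySem.Str.len_eq, PySem.List.pyRange_zero_nat, List.foldl_map]
  unfold pvInnerA
  apply PySem.List.foldl_congr_mem
  intro a k hk
  simp [PySem.Str.count_eq, PySem.Str.slice, PySem.Chars.slice,
    PySem.List.slice_to_natCast, pv_chars_count_singleton]

-- ===== VERDICT (by name: the statement is the Claim_ definition above) =====
theorem calculate_coordinates_spec : Claim_equal_calculate_coordinates := by
  intro input m _
  unfold Spec_calculate_coordinates calculate_coordinates calculate_coordinates_alt
  rw [PySem.List.foldl_pyRange_zero_pyGetD' input "" (pvRowA m) ([], -1)]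
  congr 1
  apply PySem.List.foldl_congr_mem
  intro st s _
  exact pv_row_eq m st s
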